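-- pv_equiv track=rewrite | github.com/chongwei730/nanoGPT | run_stage1_optuna.py | inferred_rung_count
-- ===== SOURCE A (Python) =====
-- import math
--
-- def inferred_rung_count(initial_trial_count, reduction_factor):
--     if initial_trial_count < 1:
--         raise ValueError("initial_trial_count must be >= 1.")
--     if reduction_factor < 2:
--         raise ValueError("reduction_factor must be >= 2.")
--
--     num_rungs = 1
--     active_trials = int(initial_trial_count)
--     while active_trials > 1:
--         active_trials = int(math.ceil(float(active_trials) / float(reduction_factor)))
--         num_rungs += 1
--     return num_rungs
-- ===== SOURCE B (Python) =====
-- def inferred_rung_count(initial_trial_count, reduction_factor):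
--     if initial_trial_count < 1:
--         raise ValueError("initial_trial_count must be >= 1.")
--     if reduction_factor < 2:
--         raise ValueError("reduction_factor must be >= 2.")
--     n = int(initial_trial_count)
--     # build the list of powers of reduction_factor up to (at least) n;
--     # each power is the trial budget a rung can still reduce, so the
--     # number of rungs is the length of this list
--     powers = [1]
--     while powers[-1] < n:
--         powers.append(powers[-1] * reduction_factor)
--     return len(powers)
-- ===== Notes on version B (the rewrite author's own statement) =====
-- stated objective: alternative
-- what changed: Instead of repeatedly ceil-dividing the survivor count down to 1, B builds the list of successive powers of reduction_factor until the last one reaches the trial count and returns its length, replacing float ceil-division state by an integer power list.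
import Mathlib
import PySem

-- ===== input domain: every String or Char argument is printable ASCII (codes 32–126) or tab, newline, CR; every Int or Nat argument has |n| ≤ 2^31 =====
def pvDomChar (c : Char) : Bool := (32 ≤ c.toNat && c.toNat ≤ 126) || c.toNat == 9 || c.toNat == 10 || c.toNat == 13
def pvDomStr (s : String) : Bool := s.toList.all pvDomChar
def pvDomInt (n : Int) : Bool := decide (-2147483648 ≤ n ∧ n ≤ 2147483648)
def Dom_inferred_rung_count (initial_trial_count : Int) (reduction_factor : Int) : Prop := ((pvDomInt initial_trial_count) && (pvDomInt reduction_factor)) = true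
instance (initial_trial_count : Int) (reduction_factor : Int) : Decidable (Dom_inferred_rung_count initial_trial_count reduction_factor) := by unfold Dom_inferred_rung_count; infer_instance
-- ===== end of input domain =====

-- B builds the list of powers of reduction_factor up to the trial count and returns its length, instead of A's repeated float ceil-division of the survivor count; alternative decomposition, same cost.


-- ===== PORT A =====
-- int(math.ceil(float(a)/float(r))) = -((-a) // r): exact on Dom, where all intermediate
-- values are far below 2^53 so the float computation is exact.
def pvCeilA (a r : Int) : Int := -(PySem.Int.floordiv (-a) r)

-- while active_trials > 1: … ; fuel n.toNat bounds the iteration count on Pre_ inputs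
def pvLoopA (r : Int) : Nat → Int → Int → Int
  | 0, num_rungs, _ => num_rungs
  | f+1, num_rungs, a => if a > 1 then pvLoopA r f (num_rungs + 1) (pvCeilA a r) else num_rungs

def inferred_rung_count (initial_trial_count : Int) (reduction_factor : Int) : Int :=
  if initial_trial_count < 1 then 0        -- Python raises ValueError: outside Pre_
  else if reduction_factor < 2 then 0      -- Python raises ValueError: outside Pre_
  else pvLoopA reduction_factor initial_trial_count.toNat 1 initial_trial_count

-- ===== PORT B =====
-- powers list is kept most-recent-first (head = powers[-1]); len is order-independent
def pvPowers (n r : Int) : Nat → List Int → List Int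
  | 0, powers => powers
  | f+1, powers => if powers.headI < n then pvPowers n r f (powers.headI * r :: powers) else powers

def inferred_rung_count_alt (initial_trial_count : Int) (reduction_factor : Int) : Int :=
  if initial_trial_count < 1 then 0        -- Python raises ValueError: outside Pre_
  else if reduction_factor < 2 then 0      -- Python raises ValueError: outside Pre_
  else ((pvPowers initial_trial_count reduction_factor initial_trial_count.toNat [1]).length : Int)

-- ===== PRECONDITION & SPEC =====
-- Pre_ excludes exactly the inputs where A raises ValueError (n < 1 or r < 2).
def Pre_inferred_rung_count (initial_trial_count : Int) (reduction_factor : Int) : Prop :=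
  1 ≤ initial_trial_count ∧ 2 ≤ reduction_factor
instance (initial_trial_count : Int) (reduction_factor : Int) : Decidable (Pre_inferred_rung_count initial_trial_count reduction_factor) := by unfold Pre_inferred_rung_count; infer_instance
def pvWitness_inferred_rung_count : Int × Int := (81, 3)

def Spec_inferred_rung_count (initial_trial_count : Int) (reduction_factor : Int) (out : Int) : Prop := out = inferred_rung_count_alt initial_trial_count reduction_factor
instance (initial_trial_count : Int) (reduction_factor : Int) (out : Int) : Decidable (Spec_inferred_rung_count initial_trial_count reduction_factor out) := by unfold Spec_inferred_rung_count; infer_instance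

-- ===== CLAIM (what is proved, stated in full; the proofs are below) =====
def Claim_equal_inferred_rung_count : Prop := ∀ (initial_trial_count : Int) (reduction_factor : Int), Dom_inferred_rung_count initial_trial_count reduction_factor → Pre_inferred_rung_count initial_trial_count reduction_factor → Spec_inferred_rung_count initial_trial_count reduction_factor (inferred_rung_count initial_trial_count reduction_factor)

-- ===== LEMMAS AND PROOFS =====

-- Characterisation of the ceiling division used by A's port.
lemma pvCeilA_char (a r : Int) (hr : 0 < r) (q : Int) :
    pvCeilA a r = q ↔ (q - 1) * r < a ∧ a ≤ q * r := by
  unfold pvCeilA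
  exact PySem.Int.neg_floordiv_neg_eq_iff_of_pos hr

lemma pvCeilA_bounds (a r : Int) (hr : 0 < r) :
    (pvCeilA a r - 1) * r < a ∧ a ≤ pvCeilA a r * r :=
  (pvCeilA_char a r hr _).mp rfl

lemma pvCeilA_one (n : Int) : pvCeilA n 1 = n := by
  rw [pvCeilA_char n 1 (by omega)]; omega

-- ⌈⌈n/p⌉/r⌉ = ⌈n/(p·r)⌉ for positive p, r
lemma pvCeilA_ceil (n p r : Int) (hp : 0 < p) (hr : 0 < r) :
    pvCeilA (pvCeilA n p) r = pvCeilA n (p * r) := by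
  obtain ⟨h1, h2⟩ := pvCeilA_bounds n p hp
  obtain ⟨h3, h4⟩ := pvCeilA_bounds n (p * r) (by positivity)
  set m := pvCeilA n p with hm
  set q := pvCeilA n (p * r) with hq
  rw [pvCeilA_char _ _ hr]
  constructor
  · nlinarith
  · nlinarith

-- cdiv n p > 1 ↔ p < n, for n ≥ 1, p ≥ 1
lemma pvCeilA_gt_one (n p : Int) (_hn : 1 ≤ n) (hp : 1 ≤ p) :
    1 < pvCeilA n p ↔ p < n := by
  obtain ⟨h1, h2⟩ := pvCeilA_bounds n p (by omega)
  constructor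
  · intro h; nlinarith
  · intro h; nlinarith

-- lockstep: the length of B's power list equals A's ceil-division loop counter
lemma powers_length_eq (n r : Int) (hn : 1 ≤ n) (hr : 2 ≤ r) :
    ∀ (f : Nat) (p : Int) (rest : List Int), 1 ≤ p →
      ((pvPowers n r f (p :: rest)).length : Int)
        = pvLoopA r f (rest.length + 1) (pvCeilA n p) := by
  intro f
  induction f with
  | zero => intro p rest _; simp [pvPowers, pvLoopA]
  | succ f ih =>
    intro p rest hp
    have hcond : (pvCeilA n p > 1) = (p < n) := by
      simp only [gt_iff_lt, eq_iff_iff]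
      exact pvCeilA_gt_one n p hn hp
    simp only [pvPowers, pvLoopA, List.headI, hcond]
    by_cases h : p < n
    · simp only [if_pos h]
      rw [ih (p * r) (p :: rest) (by nlinarith),
        pvCeilA_ceil n p r (by omega) (by omega)]
      simp only [List.length_cons]
      push_cast
      ring_nf
    · simp only [if_neg h, List.length_cons]
      push_cast
      ring

-- ===== VERDICT (by name: the statement is the Claim_ definition above) =====
theorem inferred_rung_count_spec : Claim_equal_inferred_rung_count := by
  intro n r _ hpre
  obtain ⟨hn, hr⟩ := hpre
  unfold Spec_inferred_rung_count inferred_rung_count inferred_rung_count_alt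
  rw [if_neg (by omega), if_neg (by omega), if_neg (by omega), if_neg (by omega)]
  rw [powers_length_eq n r hn hr n.toNat 1 [] (by omega), pvCeilA_one]
  simp
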